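-- pv_equiv track=rewrite | github.com/MrBrantCode/unitest_baseline | mut_generate/mist_train_cf/cf_94711/solution.py | bitwise_add_multiply
-- ===== SOURCE A (Python) =====
-- def bitwise_add_multiply(a, b, c):
--     # Step 1: Add the two integers using bitwise operators
--     while b != 0:
--         carry = a & b
--         a = a ^ b
--         b = carry << 1
--
--     # Step 2: Multiply the result by the third integer using bitwise operators
--     result = 0
--     temp_a = a
--     while c > 0:
--         if c & 1:
--             result += temp_a
--         temp_a <<= 1
--         c >>= 1
--
--     return result
-- ===== SOURCE B (Python) =====
-- def bitwise_add_multiply(a, b, c):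
--     # Closed form: the add loop computes a + b, the shift-multiply loop
--     # computes (a + b) * c for positive c and 0 otherwise.
--     return (a + b) * c if c > 0 else 0
-- ===== Notes on version B (the rewrite author's own statement) =====
-- stated objective: simpler
-- what changed: Both loops are replaced by the single closed-form expression (a+b)*c (0 when c <= 0): no bitwise carry-propagation loop for the addition and no shift-and-add loop over the bits of c.
-- outside the precondition, e.g. on bitwise_add_multiply(1, -1, 1): A does not finish within the time limit, B returns 0
import Mathlib
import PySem

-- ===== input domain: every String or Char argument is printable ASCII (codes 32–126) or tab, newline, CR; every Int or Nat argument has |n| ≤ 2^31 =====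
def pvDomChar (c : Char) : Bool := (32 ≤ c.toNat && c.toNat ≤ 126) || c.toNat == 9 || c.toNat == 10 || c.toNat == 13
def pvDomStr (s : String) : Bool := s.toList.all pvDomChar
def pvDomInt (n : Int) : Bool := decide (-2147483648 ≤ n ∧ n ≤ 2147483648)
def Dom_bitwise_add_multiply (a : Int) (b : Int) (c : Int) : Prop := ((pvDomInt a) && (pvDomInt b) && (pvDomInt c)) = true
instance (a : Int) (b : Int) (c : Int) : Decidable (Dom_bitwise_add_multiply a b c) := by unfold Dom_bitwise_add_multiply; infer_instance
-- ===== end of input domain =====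

-- B replaces A's bitwise carry-propagation add loop and shift-and-add multiply loop by the
-- single closed-form expression (a+b)*c (0 when c ≤ 0); Pre_ excludes exactly the inputs on
-- which A's add loop never terminates.


-- ===== PORT A =====
-- 'while b != 0: carry = a & b; a = a ^ b; b = carry << 1' — the fuel only makes the loop
-- total; under Pre_ (and Dom) 64 iterations are proved sufficient, so it is never exhausted.
def pvAddLoop : Nat → Int → Int → Int
  | 0, a, _ => a
  | fuel + 1, a, b =>
    if b ≠ 0 then
      let carry := PySem.Int.band a b
      pvAddLoop fuel (PySem.Int.bxor a b) (carry <<< (1 : Nat))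
    else a

-- 'while c > 0: if c & 1: result += temp_a; temp_a <<= 1; c >>= 1' — same fuel remark (c ≤ 2^31 < 2^64).
def pvMulLoop : Nat → Int → Int → Int → Int
  | 0, result, _, _ => result
  | fuel + 1, result, temp_a, c =>
    if c > 0 then
      pvMulLoop fuel (if PySem.Int.band c 1 ≠ 0 then result + temp_a else result)
        (temp_a <<< (1 : Nat)) (c >>> (1 : Nat))
    else result

def bitwise_add_multiply (a : Int) (b : Int) (c : Int) : Int :=
  pvMulLoop 64 0 (pvAddLoop 64 a b) c

-- ===== PORT B =====
def bitwise_add_multiply_alt (a : Int) (b : Int) (c : Int) : Int :=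
  if c > 0 then (a + b) * c else 0

-- ===== PRECONDITION & SPEC =====
-- Pre_ excludes exactly the inputs on which A's first loop diverges (A never returns there):
-- the bitwise add loop terminates iff both summands are nonnegative or their sum is negative.
def Pre_bitwise_add_multiply (a : Int) (b : Int) (c : Int) : Prop :=
  (0 ≤ a ∧ 0 ≤ b) ∨ a + b < 0

instance (a : Int) (b : Int) (c : Int) : Decidable (Pre_bitwise_add_multiply a b c) := by
  unfold Pre_bitwise_add_multiply; infer_instance

def pvWitness_bitwise_add_multiply : Int × Int × Int := (3, 4, 5)

def Spec_bitwise_add_multiply (a : Int) (b : Int) (c : Int) (out : Int) : Prop := out = bitwise_add_multiply_alt a b c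
instance (a : Int) (b : Int) (c : Int) (out : Int) : Decidable (Spec_bitwise_add_multiply a b c out) := by unfold Spec_bitwise_add_multiply; infer_instance

-- ===== CLAIM (what is proved, stated in full; the proofs are below) =====
def Claim_equal_bitwise_add_multiply : Prop := ∀ (a : Int) (b : Int) (c : Int), Dom_bitwise_add_multiply a b c → Pre_bitwise_add_multiply a b c → Spec_bitwise_add_multiply a b c (bitwise_add_multiply a b c)

-- ===== LEMMAS AND PROOFS =====

-- carry identities of binary addition, by induction on the bit width
theorem pvAux (n : Nat) : ∀ (a b : Nat), a < 2 ^ n → b < 2 ^ n →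
    (a ^^^ b) + 2 * (a &&& b) = a + b ∧ a ||| b = (a ^^^ b) + (a &&& b) := by
  induction n with
  | zero => intro a b ha hb; interval_cases a <;> interval_cases b <;> simp
  | succ n ih =>
    intro a b ha hb
    obtain ⟨hs, ho⟩ := ih (a / 2) (b / 2) (by omega) (by omega)
    have hx : (a ^^^ b) / 2 = (a / 2) ^^^ (b / 2) := Nat.xor_div_two
    have hand : (a &&& b) / 2 = (a / 2) &&& (b / 2) := Nat.and_div_two
    have hor : (a ||| b) / 2 = (a / 2) ||| (b / 2) := Nat.or_div_two
    have hxm : (a ^^^ b) % 2 = (a % 2) ^^^ (b % 2) := by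
      have := Nat.xor_mod_two_pow (a := a) (b := b) (n := 1); simpa using this
    have ham : (a &&& b) % 2 = (a % 2) &&& (b % 2) := by
      have := Nat.and_mod_two_pow (a := a) (b := b) (n := 1); simpa using this
    have hom : (a ||| b) % 2 = (a % 2) ||| (b % 2) := by
      have := Nat.or_mod_two_pow (a := a) (b := b) (n := 1); simpa using this
    have ea : a % 2 = 0 ∨ a % 2 = 1 := Nat.mod_two_eq_zero_or_one a
    have eb : b % 2 = 0 ∨ b % 2 = 1 := Nat.mod_two_eq_zero_or_one b
    rcases ea with ea | ea <;> rcases eb with eb | eb <;> rw [ea, eb] at hxm ham hom <;>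
      [ (have x1 : (0 ^^^ 0 : Nat) = 0 := rfl; have x2 : (0 &&& 0 : Nat) = 0 := rfl; have x3 : (0 ||| 0 : Nat) = 0 := rfl; rw [x1] at hxm; rw [x2] at ham; rw [x3] at hom);
        (have x1 : (0 ^^^ 1 : Nat) = 1 := rfl; have x2 : (0 &&& 1 : Nat) = 0 := rfl; have x3 : (0 ||| 1 : Nat) = 1 := rfl; rw [x1] at hxm; rw [x2] at ham; rw [x3] at hom);
        (have x1 : (1 ^^^ 0 : Nat) = 1 := rfl; have x2 : (1 &&& 0 : Nat) = 0 := rfl; have x3 : (1 ||| 0 : Nat) = 1 := rfl; rw [x1] at hxm; rw [x2] at ham; rw [x3] at hom);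
        (have x1 : (1 ^^^ 1 : Nat) = 0 := rfl; have x2 : (1 &&& 1 : Nat) = 1 := rfl; have x3 : (1 ||| 1 : Nat) = 1 := rfl; rw [x1] at hxm; rw [x2] at ham; rw [x3] at hom) ] <;>
      omega

theorem pvXorAndSum (a b : Nat) : (a ^^^ b) + 2 * (a &&& b) = a + b := by
  have h1 : a < 2 ^ (a + b + 1) := by have := Nat.lt_two_pow_self (n := a + b + 1); omega
  have h2 : b < 2 ^ (a + b + 1) := by have := Nat.lt_two_pow_self (n := a + b + 1); omega
  exact (pvAux (a + b + 1) a b h1 h2).1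

theorem pvOrEqXorAddAnd (a b : Nat) : a ||| b = (a ^^^ b) + (a &&& b) := by
  have h1 : a < 2 ^ (a + b + 1) := by have := Nat.lt_two_pow_self (n := a + b + 1); omega
  have h2 : b < 2 ^ (a + b + 1) := by have := Nat.lt_two_pow_self (n := a + b + 1); omega
  exact (pvAux (a + b + 1) a b h1 h2).2

theorem pvDvdAnd (k a b : Nat) (h : 2 ^ k ∣ b) : 2 ^ k ∣ (a &&& b) := by
  rw [Nat.dvd_iff_mod_eq_zero] at h ⊢
  rw [Nat.and_mod_two_pow, h, Nat.and_zero]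

theorem pvShlOne (x : Int) : x <<< (1 : Nat) = 2 * x := by
  simp [Int.shiftLeft_eq]; ring

theorem pvShrOne (c : Int) : c >>> (1 : Nat) = c / 2 := by
  rw [Int.shiftRight_eq_div_pow]; norm_num

-- sign-case evaluation of the PySem bitwise primitives
theorem pvBandNegPos (A bN : Nat) : PySem.Int.band (-(A : Int) - 1) (bN : Int) = ((bN - (bN &&& A) : Nat) : Int) := by
  have h1 : ¬ (0 ≤ -(A : Int) - 1) := by omega
  have h2 : (0 ≤ (bN : Int)) := by positivity
  simp only [PySem.Int.band, h1, h2, if_false, if_true, Int.toNat_natCast]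
  norm_num

theorem pvBxorNegPos (A bN : Nat) : PySem.Int.bxor (-(A : Int) - 1) (bN : Int) = -((A ^^^ bN : Nat) : Int) - 1 := by
  have h1 : ¬ (0 ≤ -(A : Int) - 1) := by omega
  have h2 : (0 ≤ (bN : Int)) := by positivity
  simp only [PySem.Int.bxor, h1, h2, if_false, if_true, Int.toNat_natCast]
  norm_num

theorem pvBandPosNeg (aN B : Nat) : PySem.Int.band (aN : Int) (-(B : Int) - 1) = ((aN - (aN &&& B) : Nat) : Int) := by
  rw [PySem.Int.band_comm]; exact pvBandNegPos B aN

theorem pvBxorPosNeg (aN B : Nat) : PySem.Int.bxor (aN : Int) (-(B : Int) - 1) = -((aN ^^^ B : Nat) : Int) - 1 := by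
  rw [PySem.Int.bxor_comm]; rw [pvBxorNegPos B aN, Nat.xor_comm]

theorem pvBandNegNeg (A B : Nat) : PySem.Int.band (-(A : Int) - 1) (-(B : Int) - 1) = -((A ||| B : Nat) : Int) - 1 := by
  have h1 : ¬ (0 ≤ -(A : Int) - 1) := by omega
  have h2 : ¬ (0 ≤ -(B : Int) - 1) := by omega
  simp only [PySem.Int.band, h1, h2, if_false]
  norm_num

theorem pvBxorNegNeg (A B : Nat) : PySem.Int.bxor (-(A : Int) - 1) (-(B : Int) - 1) = ((A ^^^ B : Nat) : Int) := by
  have h1 : ¬ (0 ≤ -(A : Int) - 1) := by omega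
  have h2 : ¬ (0 ≤ -(B : Int) - 1) := by omega
  simp only [PySem.Int.bxor, h1, h2, if_false]
  norm_num

-- the add loop on two nonnegative arguments computes their sum
theorem pvAddLoopNonneg (f : Nat) : ∀ (n k aN bN : Nat), aN + bN < 2 ^ n → 2 ^ k ∣ bN →
    n ≤ k + f → pvAddLoop f (aN : Int) (bN : Int) = ((aN + bN : Nat) : Int) := by
  induction f with
  | zero =>
    intro n k aN bN hsum hdvd hf
    have hb0 : bN = 0 := by
      by_contra hne
      have h1 : 2 ^ k ≤ bN := Nat.le_of_dvd (Nat.pos_of_ne_zero hne) hdvd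
      have h2 : 2 ^ n ≤ 2 ^ k := Nat.pow_le_pow_right (by norm_num) hf
      omega
    subst hb0; simp [pvAddLoop]
  | succ f ih =>
    intro n k aN bN hsum hdvd hf
    by_cases hb : bN = 0
    · subst hb; simp [pvAddLoop]
    · have hbne : ((bN : Int) ≠ 0) := by exact_mod_cast hb
      rw [pvAddLoop, if_pos hbne]
      simp only [PySem.Int.band_natCast, PySem.Int.bxor_natCast]
      rw [pvShlOne]
      have hcast : (2 : Int) * ((aN &&& bN : Nat) : Int) = ((2 * (aN &&& bN) : Nat) : Int) := by
        push_cast; ring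
      rw [hcast]
      have hsum' : (aN ^^^ bN) + 2 * (aN &&& bN) = aN + bN := pvXorAndSum aN bN
      rw [ih n (k + 1) (aN ^^^ bN) (2 * (aN &&& bN)) (by omega)
        (by obtain ⟨c, hc⟩ := pvDvdAnd k aN bN hdvd; exact ⟨c, by rw [hc]; ring⟩) (by omega)]
      rw [hsum']

-- the add loop in the stable class a = -(A+1) < 0 ≤ b with negative sum computes b - A - 1
theorem pvAddLoopNeg (f : Nat) : ∀ (n k A bN : Nat), bN ≤ A → A < 2 ^ n → 2 ^ k ∣ bN →
    n ≤ k + f → pvAddLoop f (-(A : Int) - 1) (bN : Int) = (bN : Int) - A - 1 := by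
  induction f with
  | zero =>
    intro n k A bN hle hA hdvd hf
    have hb0 : bN = 0 := by
      by_contra hne
      have h1 : 2 ^ k ≤ bN := Nat.le_of_dvd (Nat.pos_of_ne_zero hne) hdvd
      have h2 : 2 ^ n ≤ 2 ^ k := Nat.pow_le_pow_right (by norm_num) hf
      omega
    subst hb0; simp [pvAddLoop]
  | succ f ih =>
    intro n k A bN hle hA hdvd hf
    by_cases hb : bN = 0
    · subst hb; simp [pvAddLoop]
    · have hbne : ((bN : Int) ≠ 0) := by exact_mod_cast hb
      rw [pvAddLoop, if_pos hbne]
      simp only []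
      rw [pvBandNegPos, pvBxorNegPos, pvShlOne]
      have handle : bN &&& A ≤ bN := Nat.and_le_left
      have hcast : (2 : Int) * ((bN - (bN &&& A) : Nat) : Int) = ((2 * (bN - (bN &&& A)) : Nat) : Int) := by
        push_cast [handle]; ring
      rw [hcast]
      have hsumA : ((A ^^^ bN) : Int) = (A : Int) + bN - 2 * ((A &&& bN : Nat) : Int) := by
        have h := pvXorAndSum A bN
        have : ((A ^^^ bN) + 2 * (A &&& bN) : Nat) = ((A + bN : Nat)) := h
        omega
      have hcomm : bN &&& A = A &&& bN := Nat.and_comm bN A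
      have hinv : ((2 * (bN - (bN &&& A)) : Nat) : Int) - ((A ^^^ bN) : Int) = (bN : Int) - A := by
        push_cast [handle]
        rw [hsumA, hcomm]
        ring
      have hle' : 2 * (bN - (bN &&& A)) ≤ A ^^^ bN := by
        have h1 : ((2 * (bN - (bN &&& A)) : Nat) : Int) ≤ ((A ^^^ bN : Nat) : Int) := by omega
        exact_mod_cast h1
      have hA' : A ^^^ bN < 2 ^ n := Nat.xor_lt_two_pow hA (by omega)
      have hdvd' : 2 ^ (k + 1) ∣ 2 * (bN - (bN &&& A)) := by
        obtain ⟨d, hd⟩ := pvDvdAnd k A bN hdvd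
        obtain ⟨c, hc⟩ := hdvd
        rw [hcomm]
        exact ⟨c - d, by rw [Nat.mul_sub, hd, hc, Nat.mul_sub, pow_succ]; ring_nf⟩
      rw [ih n (k + 1) (A ^^^ bN) (2 * (bN - (bN &&& A))) hle' hA' hdvd' (by omega)]
      omega

-- entry case a ≥ 0 > b with negative sum: one step lands in the stable class
theorem pvAddLoopPosNeg (f n aN B : Nat) (hle : aN ≤ B) (hB : B < 2 ^ n) (haN : aN < 2 ^ n)
    (hf : n ≤ 1 + f) : pvAddLoop (f + 1) (aN : Int) (-(B : Int) - 1) = (aN : Int) - B - 1 := by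
  have hbne : (-(B : Int) - 1 ≠ 0) := by omega
  rw [pvAddLoop, if_pos hbne]
  simp only []
  rw [pvBandPosNeg, pvBxorPosNeg, pvShlOne]
  have handle : aN &&& B ≤ aN := Nat.and_le_left
  have hcast : (2 : Int) * ((aN - (aN &&& B) : Nat) : Int) = ((2 * (aN - (aN &&& B)) : Nat) : Int) := by
    push_cast [handle]; ring
  rw [hcast]
  have hxs : ((aN ^^^ B) + 2 * (aN &&& B) : Nat) = ((aN + B : Nat)) := pvXorAndSum aN B
  have hle' : 2 * (aN - (aN &&& B)) ≤ aN ^^^ B := by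
    have hab : aN &&& B ≤ B := Nat.and_le_right
    omega
  have hA' : aN ^^^ B < 2 ^ n := Nat.xor_lt_two_pow haN hB
  have hdvd' : 2 ^ 1 ∣ 2 * (aN - (aN &&& B)) := ⟨aN - (aN &&& B), by ring⟩
  rw [pvAddLoopNeg f n 1 (aN ^^^ B) (2 * (aN - (aN &&& B))) hle' hA' hdvd' (by omega)]
  omega

-- entry case a, b < 0: two steps land in the stable class
theorem pvAddLoopNegNeg (f n A B : Nat) (hA : A < 2 ^ n) (hB : B < 2 ^ n) (hf : n + 2 ≤ 2 + f) :
    pvAddLoop (f + 2) (-(A : Int) - 1) (-(B : Int) - 1) = -(A : Int) - B - 2 := by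
  have hbne : (-(B : Int) - 1 ≠ 0) := by omega
  rw [pvAddLoop, if_pos hbne]
  simp only []
  rw [pvBandNegNeg, pvBxorNegNeg, pvShlOne]
  have hb1 : (2 : Int) * (-(((A ||| B : Nat)) : Int) - 1) = -(((2 * (A ||| B) + 1 : Nat)) : Int) - 1 := by
    push_cast; ring
  rw [hb1]
  have hor : A ||| B = (A ^^^ B) + (A &&& B) := pvOrEqXorAddAnd A B
  have hxs : ((A ^^^ B) + 2 * (A &&& B) : Nat) = ((A + B : Nat)) := pvXorAndSum A B
  have horlt : A ||| B < 2 ^ n := Nat.or_lt_two_pow hA hB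
  have hle2 : (A ^^^ B) ≤ 2 * (A ||| B) + 1 := by omega
  have hxlt : A ^^^ B < 2 ^ (n + 1) := by
    have := Nat.xor_lt_two_pow hA hB
    have h2 : (2:Nat) ^ n ≤ 2 ^ (n+1) := Nat.pow_le_pow_right (by norm_num) (by omega)
    omega
  have hBlt : 2 * (A ||| B) + 1 < 2 ^ (n + 1) := by
    have h2 : (2:Nat) ^ (n+1) = 2 * 2 ^ n := by rw [pow_succ]; ring
    omega
  rw [pvAddLoopPosNeg f (n + 1) (A ^^^ B) (2 * (A ||| B) + 1) hle2 hBlt hxlt (by omega)]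
  omega

-- the add loop with fuel 64 computes a + b on every admitted input
theorem pvAddLoopEval (a b : Int) (ha : -2147483648 ≤ a ∧ a ≤ 2147483648)
    (hb : -2147483648 ≤ b ∧ b ≤ 2147483648)
    (hpre : (0 ≤ a ∧ 0 ≤ b) ∨ a + b < 0) : pvAddLoop 64 a b = a + b := by
  have h33 : (2:Nat) ^ 33 = 8589934592 := by norm_num
  by_cases ha0 : 0 ≤ a
  · by_cases hb0 : 0 ≤ b
    · have hra : a = ((a.toNat : Nat) : Int) := by omega
      have hrb : b = ((b.toNat : Nat) : Int) := by omega
      rw [hra, hrb, pvAddLoopNonneg 64 33 0 a.toNat b.toNat (by omega) (one_dvd _) (by omega)]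
      push_cast; omega
    · have hs : a + b < 0 := by omega
      have hra : a = ((a.toNat : Nat) : Int) := by omega
      have hrb : b = -(((-b - 1).toNat : Nat) : Int) - 1 := by omega
      rw [hra, hrb]
      rw [show (64:Nat) = 63 + 1 from rfl,
        pvAddLoopPosNeg 63 33 a.toNat (-b - 1).toNat (by omega) (by omega) (by omega) (by omega)]
      omega
  · by_cases hb0 : 0 ≤ b
    · have hs : a + b < 0 := by omega
      have hra : a = -(((-a - 1).toNat : Nat) : Int) - 1 := by omega
      have hrb : b = ((b.toNat : Nat) : Int) := by omega
      rw [hra, hrb, pvAddLoopNeg 64 33 0 (-a - 1).toNat b.toNat (by omega) (by omega)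
        (one_dvd _) (by omega)]
      omega
    · have hra : a = -(((-a - 1).toNat : Nat) : Int) - 1 := by omega
      have hrb : b = -(((-b - 1).toNat : Nat) : Int) - 1 := by omega
      rw [hra, hrb]
      rw [show (64:Nat) = 62 + 2 from rfl,
        pvAddLoopNegNeg 62 33 (-a - 1).toNat (-b - 1).toNat (by omega) (by omega) (by omega)]
      omega

-- the multiply loop computes res + temp_a * c for 0 ≤ c < 2^f
theorem pvMulLoopEval (f : Nat) : ∀ (res temp c : Int), 0 ≤ c → c < 2 ^ f →
    pvMulLoop f res temp c = res + temp * c := by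
  induction f with
  | zero =>
    intro res temp c h0 hlt
    have : c = 0 := by norm_num at hlt; omega
    subst this; simp [pvMulLoop]
  | succ f ih =>
    intro res temp c h0 hlt
    by_cases hc : c > 0
    · rw [pvMulLoop, if_pos hc, pvShlOne, pvShrOne]
      have hb1 : PySem.Int.band c 1 = PySem.Int.mod c 2 := PySem.Int.band_one c
      have hm : PySem.Int.mod c 2 = c % 2 := PySem.Int.mod_eq_emod_of_pos (by norm_num)
      rw [hb1, hm]
      have hc2 : (0:Int) ≤ c / 2 := by omega
      have hlt2 : c / 2 < 2 ^ f := by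
        have hp : (2:Int) ^ (f+1) = 2 * 2 ^ f := by rw [pow_succ]; ring
        omega
      rw [ih _ _ _ hc2 hlt2]
      have hdm : 2 * (c / 2) + c % 2 = c := Int.ediv_add_emod c 2
      have hsplit : temp * c = 2 * temp * (c / 2) + temp * (c % 2) := by
        linear_combination (-temp) * hdm
      rcases Int.emod_two_eq c with h | h <;> rw [h] at hsplit ⊢ <;> simp <;> linarith [hsplit]
    · rw [pvMulLoop, if_neg hc]
      have : c = 0 := by omega
      subst this; ring

-- ===== VERDICT (by name: the statement is the Claim_ definition above) =====
theorem bitwise_add_multiply_spec : Claim_equal_bitwise_add_multiply := by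
  intro a b c hdom hpre
  unfold Dom_bitwise_add_multiply pvDomInt at hdom
  simp only [Bool.and_eq_true, decide_eq_true_eq] at hdom
  obtain ⟨⟨ha, hb⟩, hc⟩ := hdom
  unfold Spec_bitwise_add_multiply bitwise_add_multiply bitwise_add_multiply_alt
  rw [pvAddLoopEval a b ha hb hpre]
  by_cases hcpos : c > 0
  · rw [if_pos hcpos, pvMulLoopEval 64 0 (a + b) c (by omega) (by norm_num; omega)]
    ring
  · rw [if_neg hcpos, show (64:Nat) = 63 + 1 from rfl, pvMulLoop, if_neg hcpos]
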